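-- pv_equiv track=rewrite | github.com/Shubham-Choudhury/GeeksforGeeks-Problems | 2024/08 August/Maximize Array Value After Rearrangement/main.py | Maximize
-- ===== SOURCE A (Python) =====
-- def Maximize(arr):
--     n = len(arr)
--     arr.sort()
--
--     val = 1000000007
--     result = 0
--
--     for i in range(n):
--         result = (result + arr[i] * i) % val
--
--     return result
-- ===== SOURCE B (Python) =====
-- def Maximize(arr):
--     arr.sort()
--     val = 1000000007
--     result = 0
--     s = 0
--     i = len(arr) - 1
--     while i > 0:
--         s += arr[i]
--         result = (result + s) % val
--         i -= 1
--     return result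
-- ===== Notes on version B (the rewrite author's own statement) =====
-- stated objective: alternative
-- what changed: Replaces the forward index loop accumulating arr[i]*i with a backward while-loop that maintains a running suffix sum and adds it to the result each step, using the identity sum(i*arr[i]) = sum of suffix sums; the multiplication per element disappears.
import Mathlib
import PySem

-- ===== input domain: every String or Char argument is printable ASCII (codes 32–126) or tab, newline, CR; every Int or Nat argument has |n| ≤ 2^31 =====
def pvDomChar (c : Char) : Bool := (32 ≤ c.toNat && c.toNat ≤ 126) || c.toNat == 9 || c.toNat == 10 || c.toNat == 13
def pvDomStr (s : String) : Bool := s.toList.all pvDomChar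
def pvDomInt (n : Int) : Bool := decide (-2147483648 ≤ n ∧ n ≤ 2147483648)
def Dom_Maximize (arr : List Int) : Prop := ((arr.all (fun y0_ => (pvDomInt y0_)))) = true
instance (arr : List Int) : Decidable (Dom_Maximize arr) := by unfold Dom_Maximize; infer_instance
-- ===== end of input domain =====

-- B replaces the forward arr[i]*i accumulation with a backward suffix-sum loop (same in-place sort
-- of the argument as A; equivalence is about the return value): an alternative decomposition.


-- ===== PORT A =====
-- for i in range(n): result = (result + arr[i] * i) % val   (indices are always in range, so pyGetD is exact)
def Maximize (arr : List Int) : Int :=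
  let n : Int := arr.length
  let a := PySem.List.sorted arr (fun x => x) false
  let val : Int := 1000000007
  (PySem.List.pyRange 0 n 1).foldl
    (fun result i => PySem.Int.mod (result + PySem.List.pyGetD a i 0 * i) val) 0

-- ===== PORT B =====
-- the while-loop of Source B: counter i counts down from len(arr)-1 while i > 0 (indices in range, pyGetD exact)
def MaximizeAltLoop (a : List Int) (val : Int) : Nat → Int → Int → Int
  | 0, _, result => result
  | i + 1, s, result =>
      let s' := s + PySem.List.pyGetD a ((i : Int) + 1) 0
      MaximizeAltLoop a val i s' (PySem.Int.mod (result + s') val)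

def Maximize_alt (arr : List Int) : Int :=
  let a := PySem.List.sorted arr (fun x => x) false
  let val : Int := 1000000007
  MaximizeAltLoop a val (a.length - 1) 0 0

-- ===== PRECONDITION & SPEC =====
def Spec_Maximize (arr : List Int) (out : Int) : Prop := out = Maximize_alt arr
instance (arr : List Int) (out : Int) : Decidable (Spec_Maximize arr out) := by unfold Spec_Maximize; infer_instance

-- ===== CLAIM (what is proved, stated in full; the proofs are below) =====
def Claim_equal_Maximize : Prop := ∀ (arr : List Int), Dom_Maximize arr → Spec_Maximize arr (Maximize arr)

-- ===== LEMMAS AND PROOFS =====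

-- a[j] with default 0, and the weighted sum pvSumW a n = Σ_{k<n} a[k]*k, as proof helpers
def pvF (a : List Int) (j : Int) : Int := PySem.List.pyGetD a j 0

def pvSumW (a : List Int) : Nat → Int
  | 0 => 0
  | n + 1 => pvSumW a n + pvF a n * n

-- A's loop over range(0, n) computes (r + Σ_{k<n} a[k]*k) % val, for n ≥ 1
theorem maximize_foldl_eq (a : List Int) :
    ∀ (n : Nat), 1 ≤ n → ∀ (r : Int),
      (PySem.List.pyRange 0 (n : Int) 1).foldl
        (fun result i => PySem.Int.mod (result + PySem.List.pyGetD a i 0 * i) 1000000007) r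
        = PySem.Int.mod (r + pvSumW a n) 1000000007 := by
  intro n
  induction n with
  | zero => omega
  | succ m ih =>
      intro _ r
      rcases Nat.eq_zero_or_pos m with hm | hm
      · subst hm
        rw [show ((0 + 1 : Nat) : Int) = 0 + 1 from by norm_num,
          PySem.List.pyRange_one_singleton]
        simp only [List.foldl_cons, List.foldl_nil, pvSumW, pvF,
          PySem.Int.mod_eq_emod_of_pos (show (0:Int) < 1000000007 from by norm_num)]
        congr 1
        ring
      · have hsplit : PySem.List.pyRange 0 ((m + 1 : Nat) : Int) 1
            = PySem.List.pyRange 0 (m : Int) 1 ++ [(m : Int)] := by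
          have h := PySem.List.pyRange_one_succ_right (a := (0 : Int)) (b := (m : Int))
            (by positivity)
          push_cast
          exact h
        rw [hsplit, List.foldl_append, ih hm r]
        simp only [List.foldl_cons, List.foldl_nil, pvSumW, pvF]
        simp only [PySem.Int.mod_eq_emod_of_pos (show (0:Int) < 1000000007 from by norm_num)]
        rw [Int.emod_add_emod]
        congr 1
        ring

-- B's countdown loop: with counter i ≥ 1, it computes (r + i*s + Σ_{1≤k≤i} a[k]*k) % val
theorem maximizeAltLoop_eq (a : List Int) :
    ∀ (i : Nat), 1 ≤ i → ∀ (s r : Int),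
      MaximizeAltLoop a 1000000007 i s r
        = PySem.Int.mod (r + i * s + pvSumW a (i + 1)) 1000000007 := by
  intro i
  induction i with
  | zero => omega
  | succ m ih =>
      intro _ s r
      rcases Nat.eq_zero_or_pos m with hm | hm
      · subst hm
        simp only [MaximizeAltLoop, pvSumW, pvF]
        congr 1
        push_cast
        simp [PySem.List.pyGetD_zero]
        ring
      · simp only [MaximizeAltLoop]
        rw [ih hm]
        simp only [pvSumW, pvF]
        simp only [PySem.Int.mod_eq_emod_of_pos (show (0:Int) < 1000000007 from by norm_num)]
        rw [add_assoc, Int.emod_add_emod]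
        congr 1
        push_cast
        ring

-- ===== VERDICT (by name: the statement is the Claim_ definition above) =====
theorem Maximize_spec : Claim_equal_Maximize := by
  intro arr _
  show Maximize arr = Maximize_alt arr
  set a := PySem.List.sorted arr (fun x => x) false with ha
  have hlen : a.length = arr.length := PySem.List.length_sorted arr (fun x => x) false
  have hMa : Maximize arr
      = (PySem.List.pyRange 0 (arr.length : Int) 1).foldl
          (fun result i => PySem.Int.mod (result + PySem.List.pyGetD a i 0 * i) 1000000007) 0 := rfl
  have hMb : Maximize_alt arr = MaximizeAltLoop a 1000000007 (a.length - 1) 0 0 := rfl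
  rw [hMa, hMb]
  rcases Nat.lt_or_ge arr.length 2 with h2 | h2
  · rcases (by omega : arr.length = 0 ∨ arr.length = 1) with h0 | h1
    · have ha0 : a = [] := List.eq_nil_of_length_eq_zero (by omega)
      rw [h0, ha0]
      simp [PySem.List.pyRange_one_eq_nil (le_refl (0 : Int)), MaximizeAltLoop]
    · have hB0 : a.length - 1 = 0 := by omega
      rw [h1, hB0]
      have hA := maximize_foldl_eq a 1 (by omega) 0
      rw [hA]
      simp [MaximizeAltLoop, pvSumW, pvF]
  · have hA := maximize_foldl_eq a arr.length (by omega) 0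
    have hB := maximizeAltLoop_eq a (arr.length - 1) (by omega) 0 0
    rw [show arr.length - 1 + 1 = arr.length from by omega] at hB
    rw [hA, hlen, hB,
      show (0:Int) + (↑(arr.length - 1) : Int) * 0 + pvSumW a arr.length
          = 0 + pvSumW a arr.length from by ring]
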